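-- pv_equiv track=rewrite | github.com/SriVishnu19/MSGSP | project/extra.py | removeItem
-- ===== SOURCE A (Python) =====
-- import copy
--
-- def seqLength(seq):
--     length = 0
--     l=0
--
--     for i in seq:
--         for j in i:
--             l=l+1
--
--     return l
--
-- def removeItem(seq, index):
--     seqcopy = copy.deepcopy(seq)
--     r=[]
--     length = seqLength(seqcopy)
--     if index < 0 or index >= length:
--         return []
--
--     count = 0
--     for itemset in seqcopy:
--         if count + len(itemset) <= index:
--             count = count+len(itemset)
--         else:
--             del itemset[index - count]
--             break
--
--     for itemset in seqcopy:
--         if len(itemset)>0: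
--             r.append(itemset)
--
--     return r
-- ===== SOURCE B (Python) =====
-- def removeItem(seq, index):
--     total = sum(len(itemset) for itemset in seq)
--     if index < 0 or index >= total:
--         return []
--     r = []
--     pos = 0
--     for itemset in seq:
--         new = [x for i, x in enumerate(itemset, pos) if i != index]
--         pos += len(itemset)
--         if new:
--             r.append(new)
--     return r
-- ===== Notes on version B (the rewrite author's own statement) =====
-- stated objective: simpler
-- what changed: Single pass that rebuilds each itemset skipping the element at the flattened index, instead of deepcopy + locate/delete in place + a separate filtering pass.
import Mathlib
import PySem

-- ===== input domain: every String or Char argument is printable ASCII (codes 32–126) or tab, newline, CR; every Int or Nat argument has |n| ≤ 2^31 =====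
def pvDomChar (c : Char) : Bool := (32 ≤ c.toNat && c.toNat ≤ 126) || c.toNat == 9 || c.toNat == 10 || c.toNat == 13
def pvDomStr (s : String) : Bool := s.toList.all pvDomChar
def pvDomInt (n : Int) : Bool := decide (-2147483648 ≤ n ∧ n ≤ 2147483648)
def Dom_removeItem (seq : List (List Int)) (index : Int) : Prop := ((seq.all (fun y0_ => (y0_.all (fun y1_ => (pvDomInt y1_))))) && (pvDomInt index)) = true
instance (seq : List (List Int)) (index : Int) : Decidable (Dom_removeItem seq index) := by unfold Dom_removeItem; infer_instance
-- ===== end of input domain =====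

-- B fuses A's deepcopy + locate/delete-in-place + filter phases into one pass that
-- rebuilds each itemset skipping the element at the flattened index (objective: simpler).

-- ===== PORT A =====
-- seqLength: the double loop counting elements
def seqLength (seq : List (List Int)) : Int :=
  seq.foldl (fun l i => i.foldl (fun l _ => l + 1) l) 0

-- first for-loop of removeItem: skip itemsets wholly before index, then delete and break
def delLoop : List (List Int) → Int → Int → List (List Int)
  | [], _, _ => []
  | itemset :: rest, index, count =>
    if count + (itemset.length : Int) ≤ index then
      itemset :: delLoop rest index (count + (itemset.length : Int))
    else
      itemset.eraseIdx (index - count).toNat :: rest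
      -- 'del itemset[index - count]': the guard ensures 0 ≤ index - count < len, where eraseIdx is exact

-- second for-loop: append nonempty itemsets to r
def filterPos : List (List Int) → List (List Int)
  | [] => []
  | itemset :: rest => if 0 < itemset.length then itemset :: filterPos rest else filterPos rest

def removeItem (seq : List (List Int)) (index : Int) : List (List Int) :=
  -- copy.deepcopy is the identity on immutable Lean lists
  if index < 0 ∨ index ≥ seqLength seq then []
  else filterPos (delLoop seq index 0)

-- ===== PORT B =====
-- the comprehension [x for i, x in enumerate(itemset, pos) if i != index]
def dropAt : List Int → Int → Int → List Int
  | [], _, _ => []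
  | x :: xs, pos, index =>
    if pos = index then dropAt xs (pos + 1) index else x :: dropAt xs (pos + 1) index

-- B's single for-loop over seq carrying the running flat position
def rebuild : List (List Int) → Int → Int → List (List Int)
  | [], _, _ => []
  | itemset :: rest, index, pos =>
    let new := dropAt itemset pos index
    let out := rebuild rest index (pos + (itemset.length : Int))
    if new = [] then out else new :: out

def removeItem_alt (seq : List (List Int)) (index : Int) : List (List Int) :=
  let total := (seq.map (fun itemset => (itemset.length : Int))).sum
  if index < 0 ∨ index ≥ total then []
  else rebuild seq index 0

-- ===== PRECONDITION & SPEC =====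
def Spec_removeItem (seq : List (List Int)) (index : Int) (out : List (List Int)) : Prop := out = removeItem_alt seq index
instance (seq : List (List Int)) (index : Int) (out : List (List Int)) : Decidable (Spec_removeItem seq index out) := by unfold Spec_removeItem; infer_instance

-- ===== CLAIM (what is proved, stated in full; the proofs are below) =====
def Claim_equal_removeItem : Prop := ∀ (seq : List (List Int)) (index : Int), Dom_removeItem seq index → Spec_removeItem seq index (removeItem seq index)

-- ===== LEMMAS AND PROOFS =====

theorem foldl_count (i : List Int) (l : Int) : i.foldl (fun l _ => l + 1) l = l + i.length := by
  induction i generalizing l with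
  | nil => simp
  | cons x xs ih => simp [List.foldl, ih]; omega

theorem foldl_len (seq : List (List Int)) (l : Int) :
    seq.foldl (fun l i => l + (i.length : Int)) l
      = l + (seq.map (fun itemset => (itemset.length : Int))).sum := by
  induction seq generalizing l with
  | nil => simp
  | cons its rest ih => simp [List.foldl, ih]; ring

theorem seqLength_eq (seq : List (List Int)) :
    seqLength seq = (seq.map (fun itemset => (itemset.length : Int))).sum := by
  unfold seqLength
  simp only [foldl_count]
  simpa using foldl_len seq 0

theorem dropAt_skip (its : List Int) (pos index : Int)
    (h : index < pos ∨ pos + its.length ≤ index) : dropAt its pos index = its := by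
  induction its generalizing pos with
  | nil => rfl
  | cons x xs ih =>
    have hx : pos ≠ index := by simp at h; omega
    simp [dropAt, hx, ih (pos + 1) (by simp at *; omega)]

theorem dropAt_erase (its : List Int) (pos index : Int)
    (h1 : pos ≤ index) (h2 : index < pos + its.length) :
    dropAt its pos index = its.eraseIdx (index - pos).toNat := by
  induction its generalizing pos with
  | nil => simp at h2; omega
  | cons x xs ih =>
    by_cases hp : pos = index
    · subst hp
      simp [dropAt, dropAt_skip xs (pos + 1) pos (by left; omega)]
    · have h1' : pos + 1 ≤ index := by omega
      have hk : (index - pos).toNat = (index - (pos + 1)).toNat + 1 := by omega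
      simp [dropAt, hp, ih (pos + 1) h1' (by simp at h2 ⊢; omega), hk]

theorem rebuild_after (seq : List (List Int)) (index pos : Int)
    (h : index < pos) : rebuild seq index pos = filterPos seq := by
  induction seq generalizing pos with
  | nil => rfl
  | cons its rest ih =>
    simp only [rebuild, filterPos, dropAt_skip its pos index (Or.inl h),
      ih (pos + its.length) (by omega)]
    by_cases he : its = []
    · simp [he]
    · have : 0 < its.length := List.length_pos_iff.mpr he
      simp [he, this]

theorem main_lemma (seq : List (List Int)) (index count : Int)
    (h1 : count ≤ index)
    (h2 : index < count + (seq.map (fun itemset => (itemset.length : Int))).sum) :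
    filterPos (delLoop seq index count) = rebuild seq index count := by
  induction seq generalizing count with
  | nil => simp at h2; omega
  | cons its rest ih =>
    by_cases h : count + (its.length : Int) ≤ index
    · have hd : dropAt its count index = its := dropAt_skip its count index (Or.inr h)
      have h2' : index < count + (its.length : Int) +
          (rest.map (fun itemset => (itemset.length : Int))).sum := by
        simp at h2; omega
      simp only [delLoop, rebuild, if_pos h, filterPos, hd,
        ih (count + its.length) h h2']
      by_cases he : its = []
      · simp [he]
      · have : 0 < its.length := List.length_pos_iff.mpr he
        simp [he, this]
    · have h2i : index < count + (its.length : Int) := by omega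
      have hd : dropAt its count index = its.eraseIdx (index - count).toNat :=
        dropAt_erase its count index h1 h2i
      simp only [delLoop, rebuild, if_neg h, filterPos, hd,
        rebuild_after rest index (count + its.length) (by omega)]
      by_cases he : its.eraseIdx (index - count).toNat = []
      · simp [he]
      · have : 0 < (its.eraseIdx (index - count).toNat).length := List.length_pos_iff.mpr he
        simp [he, this]

-- ===== VERDICT (by name: the statement is the Claim_ definition above) =====
theorem removeItem_spec : Claim_equal_removeItem := by
  intro seq index _
  unfold Spec_removeItem removeItem removeItem_alt
  rw [seqLength_eq]
  by_cases h : index < 0 ∨ index ≥ (seq.map (fun itemset => (itemset.length : Int))).sum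
  · simp [h]
  · rw [if_neg h, if_neg h]
    rcases not_or.mp h with ⟨h1, h2⟩
    exact main_lemma seq index 0 (by omega) (by omega)
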